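-- pv_equiv track=rewrite | github.com/DanielKinnito/A2SVProgress | 2nd Ed week 4/leetcode/smallest-value-after-replacing-with-sum-of-prime-factors.py | smallestValue
-- ===== SOURCE A (Python) =====
-- def smallestValue(n: int) -> int:
--     def prime_sum(num):
--         answer = 0
--         for i in range(2, num + 1):
--             while num % i == 0:
--                 num //= i
--                 answer += i
--
--         return answer
--
--     temp = prime_sum(n)
--
--     while n != temp:
--         n = temp
--         temp = prime_sum(n)
--
--     return n
-- ===== SOURCE B (Python) =====
-- def smallestValue(n: int) -> int:
--     # Different decomposition: extract the least factor one at a time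
--     # (sqrt-bounded search) instead of A's scan over every i in range(2, num+1).
--     def least_factor(m):
--         d = 2
--         while d * d <= m:
--             if m % d == 0:
--                 return d
--             d += 1
--         return m
--
--     def prime_sum(m):
--         s = 0
--         while m > 1:
--             d = least_factor(m)
--             s += d
--             m //= d
--         return s
--
--     while True:
--         s = prime_sum(n)
--         if s == n:
--             return n
--         n = s
-- ===== Notes on version B (the rewrite author's own statement) =====
-- stated objective: faster
-- what changed: B repeatedly extracts the least prime factor of m via a sqrt-bounded search and divides it out, instead of A's nested scan over every i in range(2, num+1); the outer fixed-point loop is a while-True with an early return.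
import Mathlib
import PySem

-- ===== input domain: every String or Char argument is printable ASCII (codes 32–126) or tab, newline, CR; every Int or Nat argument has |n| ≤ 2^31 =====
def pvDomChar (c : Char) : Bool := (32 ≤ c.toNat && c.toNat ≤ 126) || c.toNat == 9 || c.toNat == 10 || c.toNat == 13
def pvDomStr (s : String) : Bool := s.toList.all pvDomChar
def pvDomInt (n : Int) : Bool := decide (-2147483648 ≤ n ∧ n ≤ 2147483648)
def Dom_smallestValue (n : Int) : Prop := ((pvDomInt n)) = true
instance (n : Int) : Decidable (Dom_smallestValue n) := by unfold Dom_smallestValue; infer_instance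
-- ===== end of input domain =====

-- B replaces A's nested scan over all i in range(2, num+1) by repeated
-- extraction of the least factor found by a sqrt-bounded search (objective: faster).

-- ===== PORT A =====
-- inner 'while num % i == 0' loop; fuel (num.toNat + 1 at every call site)
-- strictly exceeds the number of iterations Python performs, since each
-- division shrinks num.
def pvInnerA : Nat → Int → Int → Int → Int × Int
  | 0, _, num, ans => (num, ans)
  | f + 1, i, num, ans =>
    if PySem.Int.mod num i = 0 then
      pvInnerA f i (PySem.Int.floordiv num i) (ans + i)
    else (num, ans)

-- 'for i in range(2, num + 1)' as recursion on i up to the fixed stop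
def pvForA (i stop num ans : Int) : Int × Int :=
  if i < stop then
    let p := pvInnerA (num.toNat + 1) i num ans
    pvForA (i + 1) stop p.1 p.2
  else (num, ans)
termination_by (stop - i).toNat
decreasing_by omega

def pvPrimeSumA (num : Int) : Int := (pvForA 2 (num + 1) num 0).2

-- 'while n != temp' loop; fuel n.toNat + 2 exceeds the number of Python
-- iterations because the value strictly decreases (and stays ≥ 0) until fixed.
def pvOuterA : Nat → Int → Int
  | 0, n => n
  | f + 1, n =>
    let t := pvPrimeSumA n
    if n = t then n else pvOuterA f t

def smallestValue (n : Int) : Int := pvOuterA (n.toNat + 2) n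

-- ===== PORT B =====
-- least_factor: 'd = 2; while d*d <= m: if m % d == 0: return d; d += 1; return m';
-- fuel m.toNat + 1 exceeds the iteration count since d increments each pass and
-- the loop runs only while d*d ≤ m.
def pvLFB : Nat → Int → Int → Int
  | 0, _, m => m
  | f + 1, d, m =>
    if d * d ≤ m then
      (if PySem.Int.mod m d = 0 then d else pvLFB f (d + 1) m)
    else m

-- prime_sum: 'while m > 1: d = least_factor(m); s += d; m //= d'; fuel
-- m.toNat + 1 exceeds the iteration count since m strictly shrinks each pass.
def pvSumB : Nat → Int → Int → Int
  | 0, _, s => s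
  | f + 1, m, s =>
    if m > 1 then
      let d := pvLFB (m.toNat + 1) 2 m
      pvSumB f (PySem.Int.floordiv m d) (s + d)
    else s

def pvPrimeSumB (m : Int) : Int := pvSumB (m.toNat + 1) m 0

-- 'while True: s = prime_sum(n); if s == n: return n; n = s'; fuel n.toNat + 2
-- exceeds the number of iterations since the value strictly decreases until fixed.
def pvOuterB : Nat → Int → Int
  | 0, n => n
  | f + 1, n =>
    let s := pvPrimeSumB n
    if s = n then n else pvOuterB f s

def smallestValue_alt (n : Int) : Int := pvOuterB (n.toNat + 2) n

-- ===== PRECONDITION & SPEC =====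
def Spec_smallestValue (n : Int) (out : Int) : Prop := out = smallestValue_alt n
instance (n : Int) (out : Int) : Decidable (Spec_smallestValue n out) := by unfold Spec_smallestValue; infer_instance

-- ===== CLAIM (what is proved, stated in full; the proofs are below) =====
def Claim_equal_smallestValue : Prop := ∀ (n : Int), Dom_smallestValue n → Spec_smallestValue n (smallestValue n)

-- ===== LEMMAS AND PROOFS =====

theorem pvDiv_lt (i num : Int) (hi : 2 ≤ i) (hn : 1 ≤ num) (hd : i ∣ num) :
    1 ≤ num / i ∧ num / i < num := by
  have hq : num / i * i = num := Int.ediv_mul_cancel hd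
  have h0 : 0 ≤ num / i := Int.ediv_nonneg (by omega) (by omega)
  have h1 : 1 ≤ num / i := by
    by_contra hcon
    have hz : num / i = 0 := by omega
    rw [hz] at hq; omega
  exact ⟨h1, by nlinarith⟩

-- reference least factor and sum-of-prime-factors (proof-side only)
def pvMF (m : Int) : Int := (m.toNat.minFac : Int)

theorem pvMF_two_le (m : Int) (hm : 2 ≤ m) : 2 ≤ pvMF m := by
  have : 2 ≤ m.toNat.minFac := (Nat.minFac_prime (by omega)).two_le
  unfold pvMF; omega

theorem pvMF_dvd (m : Int) (hm : 0 ≤ m) : pvMF m ∣ m := by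
  have h := Nat.minFac_dvd m.toNat
  have := Int.natCast_dvd_natCast.mpr h
  rwa [Int.toNat_of_nonneg hm] at this

theorem pvMF_min (m d : Int) (hd : 2 ≤ d) (hdvd : d ∣ m) (hm : 0 ≤ m) :
    pvMF m ≤ d := by
  have hdn : d.toNat ∣ m.toNat := by
    rw [← Int.natCast_dvd_natCast, Int.toNat_of_nonneg (by omega), Int.toNat_of_nonneg hm]
    exact hdvd
  have := Nat.minFac_le_of_dvd (by omega) hdn
  unfold pvMF; omega

-- if i divides m and nothing in [2, i) does, the least factor is i
theorem pvMF_eq (i m : Int) (hi : 2 ≤ i) (hm : 1 ≤ m) (hdvd : i ∣ m)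
    (hmin : ∀ d, 2 ≤ d → d < i → ¬ d ∣ m) : pvMF m = i := by
  have hm2 : 2 ≤ m := le_trans hi (Int.le_of_dvd (by omega) hdvd)
  have h1 := pvMF_two_le m hm2
  have h2 := pvMF_dvd m (by omega)
  have h3 := pvMF_min m i hi hdvd (by omega)
  rcases lt_or_ge (pvMF m) i with h | h
  · exact absurd h2 (hmin _ h1 h)
  · omega

def pvS (m : Int) : Int :=
  if h : 2 ≤ m then pvMF m + pvS (m / pvMF m) else 0
termination_by m.toNat
decreasing_by
  have := pvDiv_lt (pvMF m) m (pvMF_two_le m h) (by omega) (pvMF_dvd m (by omega))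
  omega

theorem pvS_small (m : Int) (hm : m < 2) : pvS m = 0 := by
  rw [pvS, dif_neg (by omega)]

theorem pvS_step (m : Int) (hm : 2 ≤ m) : pvS m = pvMF m + pvS (m / pvMF m) := by
  rw [pvS, dif_pos hm]

-- ===== A-side: pvPrimeSumA = pvS =====

-- inner divide-out loop, well-founded reference form
def pvDivOut (i num ans : Int) : Int × Int :=
  if h : 2 ≤ i ∧ 1 ≤ num ∧ i ∣ num then pvDivOut i (num / i) (ans + i) else (num, ans)
termination_by num.toNat
decreasing_by
  have hb := pvDiv_lt i num h.1 h.2.1 h.2.2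
  omega

theorem pvInnerA_eq_divOut (f : Nat) (i num ans : Int) (hi : 2 ≤ i) (hn : 1 ≤ num)
    (hf : num.toNat ≤ f) : pvInnerA f i num ans = pvDivOut i num ans := by
  induction f generalizing num ans with
  | zero => omega
  | succ f ih =>
    rw [pvDivOut]
    simp only [pvInnerA, PySem.Int.mod_eq_zero_iff_dvd]
    by_cases hd : i ∣ num
    · obtain ⟨hq1, hlt⟩ := pvDiv_lt i num hi hn hd
      rw [if_pos hd, dif_pos ⟨hi, hn, hd⟩,
        PySem.Int.floordiv_eq_ediv_of_pos (by omega : (0:Int) < i)]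
      exact ih _ _ hq1 (by omega)
    · rw [if_neg hd, dif_neg (by tauto)]

theorem pvDivOut_fst_dvd (i num ans : Int) : (pvDivOut i num ans).1 ∣ num := by
  induction num, ans using pvDivOut.induct i with
  | case1 num ans h ih =>
    rw [pvDivOut, dif_pos h]
    have hq : num / i * i = num := Int.ediv_mul_cancel h.2.2
    exact dvd_trans ih ⟨i, by linarith [hq, mul_comm (num / i) i]⟩
  | case2 num ans h => rw [pvDivOut, dif_neg h]

theorem pvDivOut_fst_pos (i num ans : Int) (hn : 1 ≤ num) :
    1 ≤ (pvDivOut i num ans).1 := by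
  have gen : ∀ num ans : Int, 1 ≤ num → 1 ≤ (pvDivOut i num ans).1 := by
    intro num ans
    induction num, ans using pvDivOut.induct i with
    | case1 num ans h ih =>
      rw [pvDivOut, dif_pos h]
      exact fun _ => ih (pvDiv_lt i num h.1 h.2.1 h.2.2).1
    | case2 num ans h => rw [pvDivOut, dif_neg h]; exact fun hn => hn
  exact gen num ans hn

theorem pvDivOut_fst_not_dvd (i num ans : Int) (hi : 2 ≤ i) (hn : 1 ≤ num) :
    ¬ i ∣ (pvDivOut i num ans).1 := by
  have gen : ∀ num ans : Int, 1 ≤ num → ¬ i ∣ (pvDivOut i num ans).1 := by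
    intro num ans
    induction num, ans using pvDivOut.induct i with
    | case1 num ans h ih =>
      rw [pvDivOut, dif_pos h]
      exact fun _ => ih (pvDiv_lt i num h.1 h.2.1 h.2.2).1
    | case2 num ans h =>
      rw [pvDivOut, dif_neg h]
      exact fun hn hd => h ⟨hi, hn, hd⟩
  exact gen num ans hn

theorem pvDivOut_not_dvd (i num ans : Int) (hd : ¬ i ∣ num) :
    pvDivOut i num ans = (num, ans) := by
  rw [pvDivOut, dif_neg (by tauto)]

-- dividing out the least factor i conserves ans + pvS num
theorem pvDivOut_pvS (i num ans : Int) (hi : 2 ≤ i) (hn : 1 ≤ num)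
    (hmin : ∀ d, 2 ≤ d → d < i → ¬ d ∣ num) :
    (pvDivOut i num ans).2 + pvS (pvDivOut i num ans).1 = ans + pvS num := by
  have gen : ∀ num ans : Int, 1 ≤ num → (∀ d, 2 ≤ d → d < i → ¬ d ∣ num) →
      (pvDivOut i num ans).2 + pvS (pvDivOut i num ans).1 = ans + pvS num := by
    intro num ans
    induction num, ans using pvDivOut.induct i with
    | case1 num ans h ih =>
      intro hn hmin
      rw [pvDivOut, dif_pos h]
      obtain ⟨hq1, hlt⟩ := pvDiv_lt i num h.1 h.2.1 h.2.2
      have hmf : pvMF num = i := pvMF_eq i num h.1 hn h.2.2 hmin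
      have hstep : pvS num = i + pvS (num / i) := by
        rw [pvS_step num (le_trans h.1 (Int.le_of_dvd (by omega) h.2.2)), hmf]
      rw [ih hq1 (fun d hd2 hdi hdd => hmin d hd2 hdi (hdd.trans ⟨i, (Int.ediv_mul_cancel h.2.2).symm.trans (mul_comm _ i ▸ rfl)⟩)), hstep]
      ring
    | case2 num ans h =>
      intro _ _
      rw [pvDivOut, dif_neg h]
  exact gen num ans hn hmin

theorem pvForA_one (i stop ans : Int) (hi : 2 ≤ i) : pvForA i stop 1 ans = (1, ans) := by
  rw [pvForA]
  split
  · rw [show ((1:Int).toNat + 1) = 2 from rfl,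
      pvInnerA_eq_divOut 2 i 1 ans hi le_rfl (by simp),
      pvDivOut_not_dvd i 1 ans (fun hd => by have := Int.le_of_dvd one_pos hd; omega)]
    exact pvForA_one (i + 1) stop ans (by omega)
  · rfl
termination_by (stop - i).toNat
decreasing_by omega

-- A's for-loop from state (i, cur, ans) where cur has no factor below i
theorem pvForA_pvS (i num0 cur ans : Int) (hi : 2 ≤ i) (hc : 1 ≤ cur)
    (hcn : cur ≤ num0) (hmin : ∀ d, 2 ≤ d → d < i → ¬ d ∣ cur) :
    (pvForA i (num0 + 1) cur ans).2 = ans + pvS cur := by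
  rcases lt_or_ge cur 2 with h2 | h2
  · have hc1 : cur = 1 := by omega
    subst hc1
    rw [pvForA_one i (num0 + 1) ans hi, pvS_small 1 (by omega)]
    simp
  · have hic : i ≤ cur := by
      by_contra h
      exact hmin cur h2 (by omega) (dvd_refl cur)
    rw [pvForA, if_pos (by omega : i < num0 + 1)]
    rw [pvInnerA_eq_divOut _ i cur ans hi hc (by omega)]
    have hdvd := pvDivOut_fst_dvd i cur ans
    have hpos := pvDivOut_fst_pos i cur ans hc
    have hle : (pvDivOut i cur ans).1 ≤ cur := Int.le_of_dvd (by omega) hdvd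
    rw [pvForA_pvS (i + 1) num0 (pvDivOut i cur ans).1 (pvDivOut i cur ans).2
      (by omega) hpos (by omega)
      (fun d hd2 hdi hdd => by
        rcases lt_or_ge d i with h | h
        · exact hmin d hd2 h (hdd.trans hdvd)
        · have hde : d = i := by omega
          rw [hde] at hdd
          exact pvDivOut_fst_not_dvd i cur ans hi hc hdd)]
    exact pvDivOut_pvS i cur ans hi hc hmin
termination_by (num0 + 1 - i).toNat
decreasing_by omega

theorem pvPrimeSumA_eq_pvS (num : Int) : pvPrimeSumA num = pvS num := by
  unfold pvPrimeSumA
  rcases lt_or_ge num 2 with h | h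
  · rw [pvForA, if_neg (by omega), pvS_small num h]
  · have := pvForA_pvS 2 num num 0 (by omega) (by omega) le_rfl (fun d hd2 hdi _ => by omega)
    rw [this, zero_add]

-- ===== B-side: pvPrimeSumB = pvS =====

theorem pvLFB_eq_pvMF (f : Nat) (d m : Int) (hd : 2 ≤ d) (hm : 2 ≤ m)
    (hmin : ∀ e, 2 ≤ e → e < d → ¬ e ∣ m) (hf : m.toNat + 1 - d.toNat ≤ f) :
    pvLFB f d m = pvMF m := by
  induction f generalizing d with
  | zero =>
    have hmd : m < d := by omega
    exact (pvMF_eq m m (by omega) (by omega) (dvd_refl m)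
      (fun e he2 hem => hmin e he2 (by omega))).symm
  | succ f ih =>
    simp only [pvLFB]
    by_cases hdd : d * d ≤ m
    · rw [if_pos hdd]
      by_cases hdvd : d ∣ m
      · rw [if_pos ((PySem.Int.mod_eq_zero_iff_dvd _ _).mpr hdvd)]
        exact (pvMF_eq d m hd (by omega) hdvd hmin).symm
      · rw [if_neg (fun hmod => hdvd ((PySem.Int.mod_eq_zero_iff_dvd _ _).mp hmod))]
        have hdm : d ≤ m := by nlinarith
        exact ih (d + 1) (by omega)
          (fun e he2 hed hedvd => by
            rcases lt_or_ge e d with h | h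
            · exact hmin e he2 h hedvd
            · have : e = d := by omega
              exact hdvd (this ▸ hedvd))
          (by omega)
    · rw [if_neg hdd]
      refine (pvMF_eq m m (by omega) (by omega) (dvd_refl m) (fun e he2 hem hedvd => ?_)).symm
      rcases lt_or_ge e d with h | h
      · exact hmin e he2 h hedvd
      · have hq : m / e * e = m := Int.ediv_mul_cancel hedvd
        set c := m / e with hc
        have hc0 : 0 ≤ c := Int.ediv_nonneg (by omega) (by omega)
        have hc1 : 1 ≤ c := by nlinarith
        have hc2 : 2 ≤ c := by nlinarith
        have hcd : c < d := by nlinarith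
        exact hmin c hc2 hcd ⟨e, hq.symm⟩

theorem pvSumB_eq_pvS (f : Nat) (m s : Int) (hf : m.toNat < f) :
    pvSumB f m s = s + pvS m := by
  induction f generalizing m s with
  | zero => omega
  | succ f ih =>
    simp only [pvSumB]
    by_cases hm : m > 1
    · rw [if_pos hm]
      have hlf : pvLFB (m.toNat + 1) 2 m = pvMF m :=
        pvLFB_eq_pvMF _ 2 m le_rfl (by omega) (fun e he2 hed => by omega) (by omega)
      have hmf2 := pvMF_two_le m (by omega)
      obtain ⟨hq1, hlt⟩ := pvDiv_lt (pvMF m) m hmf2 (by omega) (pvMF_dvd m (by omega))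
      rw [hlf, PySem.Int.floordiv_eq_ediv_of_pos (by omega : (0:Int) < pvMF m)]
      rw [ih (m / pvMF m) (s + pvMF m) (by omega)]
      rw [pvS_step m (by omega)]
      ring
    · rw [if_neg hm, pvS_small m (by omega)]
      ring

theorem pvPrimeSum_eq (num : Int) : pvPrimeSumA num = pvPrimeSumB num := by
  rw [pvPrimeSumA_eq_pvS]
  unfold pvPrimeSumB
  rw [pvSumB_eq_pvS _ _ _ (by omega), zero_add]

theorem pvOuter_eq (fuel : Nat) (n : Int) : pvOuterA fuel n = pvOuterB fuel n := by
  induction fuel generalizing n with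
  | zero => rfl
  | succ f ih =>
    simp only [pvOuterA, pvOuterB, ← pvPrimeSum_eq]
    by_cases h : n = pvPrimeSumA n
    · rw [if_pos h, if_pos h.symm]
    · rw [if_neg h, if_neg (fun he => h he.symm), ih]

-- ===== VERDICT (by name: the statement is the Claim_ definition above) =====
theorem smallestValue_spec : Claim_equal_smallestValue := by
  intro n _
  unfold Spec_smallestValue smallestValue smallestValue_alt
  exact pvOuter_eq _ n
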